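-- pv_equiv track=rewrite | github.com/AlBi-HHU/homo-edit-distance | HomoEditDistance.py | distancesToEmptyString
-- ===== SOURCE A (Python) =====
-- def distancesToEmptyString(s):
--     n = len(s)
--     H = dict({})
--
--     for l in range(0, n):
--         for i in range(0,n - l):
--             j = i + l
--             if i == j:
--                 H[(s, i, j)] = 1
--             else:
--                 C = list([])
--                 for k in range(i, j):
--                     C.append(H[(s, i, k)] + H[(s, k + 1, j)] - int(bool(s[i] == s[j])))
--                 H[(s, i, j)] = int(min(C))
--     return H
-- ===== SOURCE B (Python) =====
-- def distancesToEmptyString(s):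
--     memo = {}
--
--     def solve(i, j):
--         if (i, j) not in memo:
--             if i == j:
--                 memo[(i, j)] = 1
--             else:
--                 memo[(i, j)] = min(solve(i, k) + solve(k + 1, j) - (s[i] == s[j])
--                                    for k in range(i, j))
--         return memo[(i, j)]
--
--     n = len(s)
--     return {(s, i, i + l): solve(i, i + l) for l in range(n) for i in range(n - l)}
-- ===== Notes on version B (the rewrite author's own statement) =====
-- stated objective: alternative
-- what changed: Replaces the bottom-up double loop over interval lengths (with an explicit inner list of split candidates) by a top-down memoized recursion solve(i, j) over substring splits; the returned dict is assembled from the memo in the same canonical length-major order.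
import Mathlib
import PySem

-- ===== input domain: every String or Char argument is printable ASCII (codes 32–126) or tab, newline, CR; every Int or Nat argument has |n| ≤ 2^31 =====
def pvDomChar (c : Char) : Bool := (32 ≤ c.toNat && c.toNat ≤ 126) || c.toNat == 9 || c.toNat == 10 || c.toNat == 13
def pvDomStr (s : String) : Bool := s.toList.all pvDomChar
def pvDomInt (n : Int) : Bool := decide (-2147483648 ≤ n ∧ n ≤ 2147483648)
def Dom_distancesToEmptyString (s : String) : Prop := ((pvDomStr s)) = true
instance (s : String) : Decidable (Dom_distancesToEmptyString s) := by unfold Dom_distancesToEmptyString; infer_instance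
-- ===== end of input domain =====

-- B replaces A's bottom-up interval DP (length-major double loop) by a top-down
-- memoized recursion over substring splits; same results, same key order (objective: alternative).

-- ===== PORT A =====
-- Transliteration of A: length-major double loop filling dict H; C is the list of
-- split candidates, H[(s,i,j)] = min(C). Dict lookups use getD (Python's H[...] never
-- misses here); min(C) is PySem.List.min? (C is never empty on that branch).
-- The inner loop body (j = i + l; build C; insert the minimum), as a named helper.
def pvStepA (s : String) (l : Int) (H : PySem.Dict (String × Int × Int) Int) (i : Int) :
    PySem.Dict (String × Int × Int) Int :=
  let j := i + l
  if i == j then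
    H.insert (s, i, j) 1
  else
    let C : List Int := (PySem.List.pyRange i j 1).foldl (fun C k =>
      C ++ [H.getD (s, i, k) 0 + H.getD (s, k + 1, j) 0 -
            (if PySem.Str.pyGet? s i == PySem.Str.pyGet? s j then 1 else 0)]) []
    H.insert (s, i, j) ((PySem.List.min? C (fun x => x)).getD 0)

def distancesToEmptyString (s : String) : List (String × Int × Int × Int) :=
  let n : Int := PySem.Str.len s
  let H : PySem.Dict (String × Int × Int) Int :=
    (PySem.List.pyRange 0 n 1).foldl (fun H l =>
      (PySem.List.pyRange 0 (n - l) 1).foldl (pvStepA s l) H) PySem.Dict.empty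
  H.items.map (fun p => (p.1.1, p.1.2.1, p.1.2.2, p.2))

-- ===== PORT B =====
-- Transliteration of B's inner `solve`: the closure-mutated memo is threaded as state
-- (returned alongside the value); `min(... for k in range(i, j))` is the running
-- option-min fold over the range; `fuel` is a totality guard only (callers pass
-- s.length + 1, which always suffices since the span shrinks at each recursive call).
def pvSolve (s : String) (fuel : Nat) (i j : Int) (memo : PySem.Dict (Int × Int) Int) :
    PySem.Dict (Int × Int) Int × Int :=
  match fuel with
  | 0 => (memo, 0)  -- fuel is a totality guard only; callers always supply enough
  | fuel + 1 =>
    if memo.contains (i, j) then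
      (memo, memo.getD (i, j) 0)
    else
      let memo' :=
        if i == j then
          memo.insert (i, j) 1
        else
          let st := (PySem.List.pyRange i j 1).foldl (fun st k =>
            let r1 := pvSolve s fuel i k st.1
            let r2 := pvSolve s fuel (k + 1) j r1.1
            let v := r1.2 + r2.2 -
              (if PySem.Str.pyGet? s i == PySem.Str.pyGet? s j then 1 else 0)
            (r2.1, some (match st.2 with | none => v | some b => min b v)))
            (memo, (none : Option Int))
          st.1.insert (i, j) (st.2.getD 0)
      (memo', memo'.getD (i, j) 0)

-- The dict comprehension over the distinct keys (s, i, i+l) in length-major order,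
-- built directly as the (already flattened) items list, threading the memo.
def pvStepAlt (s : String) (l : Int)
    (st : List (String × Int × Int × Int) × PySem.Dict (Int × Int) Int) (i : Int) :
    List (String × Int × Int × Int) × PySem.Dict (Int × Int) Int :=
  let r := pvSolve s (s.length + 1) i (i + l) st.2
  (st.1 ++ [(s, i, i + l, r.2)], r.1)

def distancesToEmptyString_alt (s : String) : List (String × Int × Int × Int) :=
  let n : Int := PySem.Str.len s
  let st :=
    (PySem.List.pyRange 0 n 1).foldl (fun st l =>
      (PySem.List.pyRange 0 (n - l) 1).foldl (pvStepAlt s l) st)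
      (([] : List (String × Int × Int × Int)), PySem.Dict.empty)
  st.1

-- ===== PRECONDITION & SPEC =====
def Spec_distancesToEmptyString (s : String) (out : List (String × Int × Int × Int)) : Prop := out = distancesToEmptyString_alt s
instance (s : String) (out : List (String × Int × Int × Int)) : Decidable (Spec_distancesToEmptyString s out) := by unfold Spec_distancesToEmptyString; infer_instance

-- ===== CLAIM (what is proved, stated in full; the proofs are below) =====
def Claim_equal_distancesToEmptyString : Prop := ∀ (s : String), Dom_distancesToEmptyString s → Spec_distancesToEmptyString s (distancesToEmptyString s)

-- ===== LEMMAS AND PROOFS =====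

-- The homo-edit distance of the span of length d starting at a (the value both
-- programs store under key (s, a, a+d)).
def pvDelta (s : String) (i j : Int) : Int :=
  if PySem.Str.pyGet? s i == PySem.Str.pyGet? s j then 1 else 0

def pvMin : List Int → Int
  | [] => 0
  | x :: t => t.foldl min x

def pvV (s : String) : Nat → Nat → Int
  | 0, _ => 1
  | (d+1), a =>
    pvMin ((List.range (d+1)).attach.map (fun t =>
      pvV s t.1 a + pvV s (d - t.1) (a + t.1 + 1) - pvDelta s (a : Int) ((a : Int) + (d : Int) + 1)))
termination_by d _ => d
decreasing_by
  · have := List.mem_range.1 t.2; omega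
  · have := List.mem_range.1 t.2; omega

lemma pvV_zero (s : String) (a : Nat) : pvV s 0 a = 1 := by rw [pvV]

lemma pvV_succ (s : String) (d a : Nat) :
    pvV s (d+1) a = pvMin ((List.range (d+1)).map (fun t =>
      pvV s t a + pvV s (d - t) (a + t + 1) - pvDelta s (a : Int) ((a : Int) + (d : Int) + 1))) := by
  rw [pvV]
  exact congrArg pvMin (List.attach_map_val (l := List.range (d+1))
    (f := fun t => pvV s t a + pvV s (d - t) (a + t + 1) - pvDelta s (a : Int) ((a : Int) + (d : Int) + 1)))

def pvK (s : String) (a d : Nat) : String × Int × Int := (s, (a : Int), (a : Int) + (d : Int))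

lemma pvK_inj {s : String} {a d a' d' : Nat} (h : pvK s a d = pvK s a' d') : a = a' ∧ d = d' := by
  simp only [pvK, Prod.mk.injEq] at h
  omega

def pvRowTo (s : String) (l c : Nat) : List ((String × Int × Int) × Int) :=
  (List.range c).map (fun a => (pvK s a l, pvV s l a))

def pvTable (s : String) (m : Nat) : List ((String × Int × Int) × Int) :=
  (List.range m).flatMap (fun l => pvRowTo s l (s.length - l))

lemma pvTable_succ (s : String) (m : Nat) :
    pvTable s (m+1) = pvTable s m ++ pvRowTo s m (s.length - m) := by
  simp [pvTable, List.range_succ]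

lemma pvGet?_mk_nil {κ ν : Type} [BEq κ] (k : κ) :
    (PySem.Dict.mk ([] : List (κ × ν))).get? k = none := by
  have : (PySem.Dict.mk ([] : List (κ × ν))) = PySem.Dict.empty := rfl
  rw [this, PySem.Dict.get?_empty]

lemma pvGet?_mk_append {κ ν : Type} [BEq κ] (L1 L2 : List (κ × ν)) (k : κ) :
    (PySem.Dict.mk (L1 ++ L2)).get? k
      = ((PySem.Dict.mk L1).get? k).or ((PySem.Dict.mk L2).get? k) := by
  induction L1 with
  | nil => simp [pvGet?_mk_nil]
  | cons p L1 ih =>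
    obtain ⟨k', v⟩ := p
    rw [List.cons_append, PySem.Dict.get?_mk_cons, PySem.Dict.get?_mk_cons]
    by_cases h : (k' == k) = true
    · simp [h]
    · simp [h, ih]

lemma pvGet?_mk_map_mem {κ ν : Type} [BEq κ] [LawfulBEq κ] (f : Nat → κ) (g : Nat → ν)
    (hf : ∀ x y : Nat, f x = f y → x = y) :
    ∀ (is : List Nat) (a : Nat), a ∈ is →
      (PySem.Dict.mk (is.map (fun i => (f i, g i)))).get? (f a) = some (g a) := by
  intro is
  induction is with
  | nil => intro a ha; simp at ha
  | cons i is ih =>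
    intro a ha
    rw [List.map_cons, PySem.Dict.get?_mk_cons]
    by_cases h : (f i == f a) = true
    · have : i = a := hf _ _ (by simpa using h)
      subst this; simp
    · have hne : i ≠ a := fun hia => h (by simp [hia])
      have : a ∈ is := by
        rcases List.mem_cons.1 ha with h' | h'
        · exact absurd h'.symm hne
        · exact h'
      simp only [h]
      exact ih a this

lemma pvGet?_mk_map_not {κ ν : Type} [BEq κ] [LawfulBEq κ] (f : Nat → κ) (g : Nat → ν) (k : κ) :
    ∀ (is : List Nat), (∀ i ∈ is, k ≠ f i) →
      (PySem.Dict.mk (is.map (fun i => (f i, g i)))).get? k = none := by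
  intro is
  induction is with
  | nil => intro _; simp [pvGet?_mk_nil]
  | cons i is ih =>
    intro h
    rw [List.map_cons, PySem.Dict.get?_mk_cons]
    have : (f i == k) = false := by
      simpa using fun he => (h i (List.mem_cons_self)) he.symm
    simp only [this, Bool.false_eq_true, if_false]
    exact ih (fun j hj => h j (List.mem_cons_of_mem _ hj))

lemma pvGet?_rowTo_hit (s : String) (l c a : Nat) (ha : a < c) :
    (PySem.Dict.mk (pvRowTo s l c)).get? (pvK s a l) = some (pvV s l a) :=
  pvGet?_mk_map_mem (fun i => pvK s i l) (fun i => pvV s l i)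
    (fun x y h => (pvK_inj h).1) (List.range c) a (List.mem_range.2 ha)

lemma pvGet?_rowTo_miss_span (s : String) (l c a d : Nat) (hd : d ≠ l) :
    (PySem.Dict.mk (pvRowTo s l c)).get? (pvK s a d) = none :=
  pvGet?_mk_map_not (fun i => pvK s i l) (fun i => pvV s l i) (pvK s a d) (List.range c)
    (fun i _ h => hd (pvK_inj h).2)

lemma pvGet?_rowTo_miss_idx (s : String) (l c a : Nat) (ha : c ≤ a) :
    (PySem.Dict.mk (pvRowTo s l c)).get? (pvK s a l) = none :=
  pvGet?_mk_map_not (fun i => pvK s i l) (fun i => pvV s l i) (pvK s a l) (List.range c)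
    (fun i hi h => by have := (pvK_inj h).1; have := List.mem_range.1 hi; omega)

lemma pvGet?_table_ge (s : String) (m a d : Nat) (hd : m ≤ d) :
    (PySem.Dict.mk (pvTable s m)).get? (pvK s a d) = none := by
  induction m with
  | zero => simp [pvTable, pvGet?_mk_nil]
  | succ m ih =>
    rw [pvTable_succ, pvGet?_mk_append, ih (by omega),
      pvGet?_rowTo_miss_span s m _ a d (by omega)]
    rfl

lemma pvGet?_table_lt (s : String) (m a d : Nat) (hd : d < m) (ha : a + d < s.length) :
    (PySem.Dict.mk (pvTable s m)).get? (pvK s a d) = some (pvV s d a) := by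
  induction m with
  | zero => omega
  | succ m ih =>
    rw [pvTable_succ, pvGet?_mk_append]
    by_cases h : d < m
    · rw [ih h]; rfl
    · have hdm : d = m := by omega
      subst hdm
      rw [pvGet?_table_ge s d a d (le_refl d), pvGet?_rowTo_hit s d _ a (by omega)]
      rfl

lemma pvGetD_partial (s : String) (l c a d : Nat) (hd : d < l) (ha : a + d < s.length) :
    (PySem.Dict.mk (pvTable s l ++ pvRowTo s l c)).getD (pvK s a d) 0 = pvV s d a := by
  rw [PySem.Dict.getD_eq_get?_getD, pvGet?_mk_append, pvGet?_table_lt s l a d hd ha]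
  rfl


lemma pvMin?_getD (x : Int) (t : List Int) :
    (PySem.List.min? (x :: t) (fun y => y)).getD 0 = pvMin (x :: t) := by
  rw [PySem.List.min?_id_cons]; rfl

lemma pvRowTo_succ (s : String) (l c : Nat) :
    pvRowTo s l (c+1) = pvRowTo s l c ++ [(pvK s c l, pvV s l c)] := by
  simp [pvRowTo, List.range_succ]

lemma pvInsert_fresh (s : String) (l c : Nat) :
    (PySem.Dict.mk (pvTable s l ++ pvRowTo s l c)).insert (pvK s c l) (pvV s l c)
      = PySem.Dict.mk (pvTable s l ++ pvRowTo s l (c+1)) := by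
  have hfresh : (PySem.Dict.mk (pvTable s l ++ pvRowTo s l c)).contains (pvK s c l) = false := by
    rw [← PySem.Dict.get?_eq_none_iff_contains, pvGet?_mk_append,
      pvGet?_table_ge s l c l (le_refl l), pvGet?_rowTo_miss_idx s l c c (le_refl c)]
    rfl
  apply PySem.Dict.ext
  rw [PySem.Dict.items_insert_of_not_contains _ _ hfresh]
  show (pvTable s l ++ pvRowTo s l c) ++ [(pvK s c l, pvV s l c)] = pvTable s l ++ pvRowTo s l (c+1)
  rw [pvRowTo_succ, List.append_assoc]

lemma pvMin?_getD' (L : List Int) (h : L ≠ []) :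
    (PySem.List.min? L (fun y => y)).getD 0 = pvMin L := by
  cases L with
  | nil => exact absurd rfl h
  | cons x t => exact pvMin?_getD x t

lemma pvMin_append_singleton (L : List Int) (x : Int) (h : L ≠ []) :
    pvMin (L ++ [x]) = min (pvMin L) x := by
  cases L with
  | nil => exact absurd rfl h
  | cons y t => simp [pvMin, List.foldl_append]

lemma pvStepA_eq (s : String) (l c : Nat) (h : c + l < s.length) :
    pvStepA s (l : Int) (PySem.Dict.mk (pvTable s l ++ pvRowTo s l c)) (c : Int)
      = PySem.Dict.mk (pvTable s l ++ pvRowTo s l (c+1)) := by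
  by_cases hl : l = 0
  · subst hl
    have hins := pvInsert_fresh s 0 c
    rw [pvV_zero] at hins
    simpa [pvStepA, pvK] using hins
  · obtain ⟨l', rfl⟩ : ∃ l', l = l' + 1 := ⟨l - 1, by omega⟩
    have hcond : (((c : Nat) : Int) == ((c : Nat) : Int) + (((l' + 1 : Nat) : Nat) : Int)) = false := by
      simp only [beq_eq_false_iff_ne, ne_eq]
      omega
    have hr : PySem.List.pyRange (c : Int) ((c : Int) + ((l' + 1 : Nat) : Int)) 1
        = (List.range (l' + 1)).map (fun (t : Nat) => (c : Int) + (t : Int)) := by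
      rw [PySem.List.pyRange_one]
      have h1 : (((c : Int) + ((l' + 1 : Nat) : Int)) - (c : Int)).toNat = l' + 1 := by omega
      rw [h1]
    have hC : ∀ H : PySem.Dict (String × Int × Int) Int,
        H = PySem.Dict.mk (pvTable s (l'+1) ++ pvRowTo s (l'+1) c) →
        (PySem.List.pyRange (c : Int) ((c : Int) + ((l' + 1 : Nat) : Int)) 1).foldl (fun C k =>
          C ++ [H.getD (s, (c : Int), k) 0 + H.getD (s, k + 1, (c : Int) + ((l' + 1 : Nat) : Int)) 0 -
                (if PySem.Str.pyGet? s (c : Int) == PySem.Str.pyGet? s ((c : Int) + ((l' + 1 : Nat) : Int)) then 1 else 0)]) []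
        = (List.range (l' + 1)).map (fun t =>
            pvV s t c + pvV s (l' - t) (c + t + 1) - pvDelta s (c : Int) ((c : Int) + (l' : Int) + 1)) := by
      intro H hH
      rw [hr, List.foldl_map, PySem.List.foldl_append_singleton_eq_map, List.nil_append]
      apply List.map_congr_left
      intro t ht
      have ht' : t < l' + 1 := List.mem_range.1 ht
      have e1 : H.getD (s, (c : Int), (c : Int) + (t : Int)) 0 = pvV s t c := by
        rw [hH]
        exact pvGetD_partial s (l'+1) c c t (by omega) (by omega)
      have hk2 : ((s, (c : Int) + (t : Int) + 1, (c : Int) + ((l' + 1 : Nat) : Int)) : String × Int × Int)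
          = pvK s (c + t + 1) (l' - t) := by
        simp only [pvK, Prod.mk.injEq, true_and]
        constructor <;> push_cast <;> omega
      have e2 : H.getD ((s, (c : Int) + (t : Int) + 1, (c : Int) + ((l' + 1 : Nat) : Int))) 0
          = pvV s (l' - t) (c + t + 1) := by
        rw [hH, hk2]
        exact pvGetD_partial s (l'+1) c (c + t + 1) (l' - t) (by omega) (by omega)
      have hj : ((c : Int) + ((l' + 1 : Nat) : Int)) = (c : Int) + (l' : Int) + 1 := by push_cast; ring
      rw [e1, e2, hj]
      rfl
    simp only [pvStepA, hcond, Bool.false_eq_true, if_false]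
    rw [hC _ rfl, pvMin?_getD' _ (by simp), ← pvV_succ]
    exact pvInsert_fresh s (l'+1) c

lemma pvA_row (s : String) (l : Nat) :
    ∀ c : Nat, c + l ≤ s.length →
      (List.range c).foldl (fun H (a : Nat) => pvStepA s (l : Int) H (a : Int))
          (PySem.Dict.mk (pvTable s l))
        = PySem.Dict.mk (pvTable s l ++ pvRowTo s l c) := by
  intro c
  induction c with
  | zero => intro _; simp [pvRowTo]
  | succ c ih =>
    intro hc
    rw [List.range_succ, List.foldl_append, ih (by omega)]
    simpa using pvStepA_eq s l c (by omega)

lemma pvA_outer (s : String) :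
    ∀ m : Nat, m ≤ s.length →
      (List.range m).foldl
          (fun H (lN : Nat) => (PySem.List.pyRange 0 ((s.length : Int) - (lN : Int)) 1).foldl
            (pvStepA s (lN : Int)) H)
          (PySem.Dict.mk [])
        = PySem.Dict.mk (pvTable s m) := by
  intro m
  induction m with
  | zero => intro _; simp [pvTable]
  | succ m ih =>
    intro hm
    rw [List.range_succ, List.foldl_append, ih (by omega)]
    show (PySem.List.pyRange 0 ((s.length : Int) - (m : Int)) 1).foldl (pvStepA s (m : Int))
        (PySem.Dict.mk (pvTable s m)) = PySem.Dict.mk (pvTable s (m+1))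
    have hrange : PySem.List.pyRange 0 ((s.length : Int) - (m : Int)) 1
        = (List.range (s.length - m)).map (fun (a : Nat) => (a : Int)) := by
      rw [PySem.List.pyRange_one]
      have h1 : (((s.length : Int) - (m : Int)) - 0).toNat = s.length - m := by omega
      rw [h1]
      exact List.map_congr_left (fun a _ => by omega)
    rw [hrange, List.foldl_map, pvA_row s m (s.length - m) (by omega), pvTable_succ]

def pvFlat (p : (String × Int × Int) × Int) : String × Int × Int × Int :=
  (p.1.1, p.1.2.1, p.1.2.2, p.2)

lemma pvA_result (s : String) :
    distancesToEmptyString s = (pvTable s s.length).map pvFlat := by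
  show ((PySem.List.pyRange 0 (PySem.Str.len s) 1).foldl (fun H l =>
      (PySem.List.pyRange 0 (PySem.Str.len s - l) 1).foldl (pvStepA s l) H)
      PySem.Dict.empty).items.map (fun p => (p.1.1, p.1.2.1, p.1.2.2, p.2))
    = (pvTable s s.length).map pvFlat
  have hlen : PySem.Str.len s = (s.length : Int) := by simp [PySem.Str.len]
  rw [hlen, PySem.List.pyRange_zero_natCast, List.foldl_map]
  have he : (PySem.Dict.empty : PySem.Dict (String × Int × Int) Int) = PySem.Dict.mk [] := rfl
  rw [he, pvA_outer s s.length (le_refl _)]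
  rfl

def pvMemoOK (s : String) (m : PySem.Dict (Int × Int) Int) : Prop :=
  ∀ (a d : Nat) (v : Int), m.get? ((a : Int), (a : Int) + (d : Int)) = some v → v = pvV s d a

lemma pvMemoOK_insert {s : String} {m : PySem.Dict (Int × Int) Int}
    (hm : pvMemoOK s m) (a d : Nat) :
    pvMemoOK s (m.insert ((a : Int), (a : Int) + (d : Int)) (pvV s d a)) := by
  intro a' d' v hv
  rw [PySem.Dict.get?_insert] at hv
  split_ifs at hv with hk
  · have h1 : a' = a ∧ d' = d := by
      rw [Prod.mk.injEq] at hk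
      omega
    obtain ⟨rfl, rfl⟩ := h1
    injection hv with h2
    exact h2.symm
  · exact hm a' d' v hv

def pvStepB (s : String) (fuel : Nat) (a e : Nat) (st : PySem.Dict (Int × Int) Int × Option Int) (t : Nat) :
    PySem.Dict (Int × Int) Int × Option Int :=
  let r1 := pvSolve s fuel (a : Int) ((a : Int) + (t : Int)) st.1
  let r2 := pvSolve s fuel ((a : Int) + (t : Int) + 1) ((a : Int) + ((e + 1 : Nat) : Int)) r1.1
  let v := r1.2 + r2.2 -
    (if PySem.Str.pyGet? s (a : Int) == PySem.Str.pyGet? s ((a : Int) + ((e + 1 : Nat) : Int)) then 1 else 0)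
  (r2.1, some (match st.2 with | none => v | some b => min b v))

lemma pvFoldB_ok (s : String) (fuel : Nat) (a e : Nat)
    (IH : ∀ m < e + 1, ∀ (a' : Nat) (memo' : PySem.Dict (Int × Int) Int), pvMemoOK s memo' →
      (pvSolve s fuel (a' : Int) ((a' : Int) + (m : Int)) memo').2 = pvV s m a' ∧
      pvMemoOK s (pvSolve s fuel (a' : Int) ((a' : Int) + (m : Int)) memo').1)
    (memo : PySem.Dict (Int × Int) Int) (hm : pvMemoOK s memo) :
    ∀ c : Nat, c ≤ e + 1 →
      pvMemoOK s ((List.range c).foldl (pvStepB s fuel a e) (memo, none)).1 ∧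
      ((List.range c).foldl (pvStepB s fuel a e) (memo, none)).2
        = (if c = 0 then none else some (pvMin ((List.range c).map (fun t =>
            pvV s t a + pvV s (e - t) (a + t + 1)
              - pvDelta s (a : Int) ((a : Int) + ((e + 1 : Nat) : Int)))))) := by
  intro c
  induction c with
  | zero => intro _; exact ⟨hm, rfl⟩
  | succ c ihc =>
    intro hc
    obtain ⟨h1, h2⟩ := ihc (by omega)
    rw [List.range_succ, List.foldl_append, List.foldl_cons, List.foldl_nil]
    have ha1 : ((a : Int) + (c : Int) + 1) = ((a + c + 1 : Nat) : Int) := by push_cast; ring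
    have ha2 : ((a : Int) + ((e + 1 : Nat) : Int)) = ((a + c + 1 : Nat) : Int) + ((e - c : Nat) : Int) := by
      push_cast; omega
    obtain ⟨hr1v, hr1m⟩ := IH c (by omega) a _ h1
    obtain ⟨hr2v, hr2m⟩ := IH (e - c) (by omega) (a + c + 1) _ hr1m
    constructor
    · show pvMemoOK s (pvSolve s fuel ((a : Int) + (c : Int) + 1) ((a : Int) + ((e + 1 : Nat) : Int))
        (pvSolve s fuel (a : Int) ((a : Int) + (c : Int)) ((List.range c).foldl (pvStepB s fuel a e) (memo, none)).1).1).1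
      rw [ha1, ha2]
      exact hr2m
    · show (some (match ((List.range c).foldl (pvStepB s fuel a e) (memo, none)).2 with
          | none => (pvSolve s fuel (a : Int) ((a : Int) + (c : Int)) ((List.range c).foldl (pvStepB s fuel a e) (memo, none)).1).2
                + (pvSolve s fuel ((a : Int) + (c : Int) + 1) ((a : Int) + ((e + 1 : Nat) : Int))
                    (pvSolve s fuel (a : Int) ((a : Int) + (c : Int)) ((List.range c).foldl (pvStepB s fuel a e) (memo, none)).1).1).2
                - (if PySem.Str.pyGet? s (a : Int) == PySem.Str.pyGet? s ((a : Int) + ((e + 1 : Nat) : Int)) then 1 else 0)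
          | some b => min b ((pvSolve s fuel (a : Int) ((a : Int) + (c : Int)) ((List.range c).foldl (pvStepB s fuel a e) (memo, none)).1).2
                + (pvSolve s fuel ((a : Int) + (c : Int) + 1) ((a : Int) + ((e + 1 : Nat) : Int))
                    (pvSolve s fuel (a : Int) ((a : Int) + (c : Int)) ((List.range c).foldl (pvStepB s fuel a e) (memo, none)).1).1).2
                - (if PySem.Str.pyGet? s (a : Int) == PySem.Str.pyGet? s ((a : Int) + ((e + 1 : Nat) : Int)) then 1 else 0))))
        = (if c + 1 = 0 then none else some (pvMin ((List.range c ++ [c]).map (fun t =>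
            pvV s t a + pvV s (e - t) (a + t + 1)
              - pvDelta s (a : Int) ((a : Int) + ((e + 1 : Nat) : Int))))))
      have hv : (pvSolve s fuel (a : Int) ((a : Int) + (c : Int)) ((List.range c).foldl (pvStepB s fuel a e) (memo, none)).1).2
                + (pvSolve s fuel ((a : Int) + (c : Int) + 1) ((a : Int) + ((e + 1 : Nat) : Int))
                    (pvSolve s fuel (a : Int) ((a : Int) + (c : Int)) ((List.range c).foldl (pvStepB s fuel a e) (memo, none)).1).1).2
                - (if PySem.Str.pyGet? s (a : Int) == PySem.Str.pyGet? s ((a : Int) + ((e + 1 : Nat) : Int)) then 1 else 0)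
          = pvV s c a + pvV s (e - c) (a + c + 1) - pvDelta s (a : Int) ((a : Int) + ((e + 1 : Nat) : Int)) := by
        rw [hr1v, ha1, ha2, hr2v]
        rfl
      by_cases hc0 : c = 0
      · subst hc0
        rw [if_pos rfl] at h2
        rw [h2]
        simp only [if_neg (Nat.succ_ne_zero 0)]
        rw [hv]
        norm_num [pvMin]
      · rw [if_neg hc0] at h2
        rw [h2]
        simp only [if_neg (Nat.succ_ne_zero c)]
        rw [hv, List.map_append, List.map_singleton,
          pvMin_append_singleton _ _ (by
            simp only [ne_eq, List.map_eq_nil_iff, List.range_eq_nil]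
            exact hc0)]


lemma pvSolve_ok (s : String) :
    ∀ d fuel : Nat, d < fuel → ∀ a : Nat, ∀ memo : PySem.Dict (Int × Int) Int, pvMemoOK s memo →
      (pvSolve s fuel (a : Int) ((a : Int) + (d : Int)) memo).2 = pvV s d a ∧
      pvMemoOK s (pvSolve s fuel (a : Int) ((a : Int) + (d : Int)) memo).1 := by
  intro d
  induction d using Nat.strong_induction_on with
  | _ d IH =>
  intro fuel hfuel a memo hm
  obtain ⟨f, rfl⟩ : ∃ f, fuel = f + 1 := ⟨fuel - 1, by omega⟩
  rw [pvSolve]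
  by_cases hc : memo.contains ((a : Int), (a : Int) + (d : Int)) = true
  · obtain ⟨v, hv⟩ : ∃ v, memo.get? ((a : Int), (a : Int) + (d : Int)) = some v := by
      have h1 := PySem.Dict.contains_eq_isSome_get? memo ((a : Int), (a : Int) + (d : Int))
      rw [hc] at h1
      exact Option.isSome_iff_exists.1 h1.symm
    rw [if_pos hc]
    refine ⟨?_, hm⟩
    rw [PySem.Dict.getD_eq_get?_getD, hv]
    exact hm a d v hv
  · rw [if_neg hc]
    by_cases hd : d = 0
    · subst hd
      have hcond : (((a : Nat) : Int) == ((a : Nat) : Int) + (((0 : Nat) : Nat) : Int)) = true := by simp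
      rw [hcond, if_pos rfl]
      constructor
      · show (memo.insert ((a : Int), (a : Int) + ((0 : Nat) : Int)) 1).getD
            ((a : Int), (a : Int) + ((0 : Nat) : Int)) 0 = pvV s 0 a
        rw [PySem.Dict.getD_insert_self, pvV_zero]
      · show pvMemoOK s (memo.insert ((a : Int), (a : Int) + ((0 : Nat) : Int)) 1)
        have h := pvMemoOK_insert hm a 0
        rw [pvV_zero] at h
        exact h
    · obtain ⟨e, rfl⟩ : ∃ e, d = e + 1 := ⟨d - 1, by omega⟩
      have hcond : (((a : Nat) : Int) == ((a : Nat) : Int) + (((e + 1 : Nat) : Nat) : Int)) = false := by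
        simp only [beq_eq_false_iff_ne, ne_eq]
        omega
      rw [hcond]
      simp only [Bool.false_eq_true, if_false]
      have hr : PySem.List.pyRange ((a : Nat) : Int) (((a : Nat) : Int) + ((e + 1 : Nat) : Int)) 1
          = (List.range (e + 1)).map (fun (t : Nat) => ((a : Int) + (t : Int))) := by
        rw [PySem.List.pyRange_one]
        have h1 : ((((a : Int)) + ((e + 1 : Nat) : Int)) - (a : Int)).toNat = e + 1 := by omega
        rw [h1]
      rw [hr, List.foldl_map]
      obtain ⟨hf1, hf2⟩ := pvFoldB_ok s f a e
        (fun m hmlt a' memo' hm' => IH m (by omega) f (by omega) a' memo' hm') memo hm (e + 1) le_rfl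
      have hval : (((List.range (e + 1)).foldl (pvStepB s f a e) (memo, none)).2).getD 0
          = pvV s (e + 1) a := by
        rw [hf2, if_neg (Nat.succ_ne_zero e)]
        simp only [Option.getD_some]
        rw [pvV_succ]
        have hh : ((a : Int) + ((e + 1 : Nat) : Int)) = (a : Int) + (e : Int) + 1 := by push_cast; ring
        rw [hh]
      constructor
      · show ((((List.range (e + 1)).foldl (pvStepB s f a e) (memo, none)).1).insert
              ((a : Int), (a : Int) + ((e + 1 : Nat) : Int))
              ((((List.range (e + 1)).foldl (pvStepB s f a e) (memo, none)).2).getD 0)).getD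
            ((a : Int), (a : Int) + ((e + 1 : Nat) : Int)) 0 = pvV s (e + 1) a
        rw [PySem.Dict.getD_insert_self]
        exact hval
      · show pvMemoOK s ((((List.range (e + 1)).foldl (pvStepB s f a e) (memo, none)).1).insert
              ((a : Int), (a : Int) + ((e + 1 : Nat) : Int))
              ((((List.range (e + 1)).foldl (pvStepB s f a e) (memo, none)).2).getD 0))
        rw [hval]
        exact pvMemoOK_insert hf1 a (e + 1)

lemma pvMemoOK_empty (s : String) : pvMemoOK s PySem.Dict.empty := by
  intro a d v hv
  rw [PySem.Dict.get?_empty] at hv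
  exact absurd hv (by simp)

lemma pvB_row (s : String) (l : Nat) (hl : l < s.length + 1) :
    ∀ c : Nat, ∀ (acc : List (String × Int × Int × Int)) (memo : PySem.Dict (Int × Int) Int),
      pvMemoOK s memo →
      ∃ memo', (List.range c).foldl (fun st (a : Nat) => pvStepAlt s (l : Int) st (a : Int)) (acc, memo)
          = (acc ++ (pvRowTo s l c).map pvFlat, memo') ∧ pvMemoOK s memo' := by
  intro c
  induction c with
  | zero => intro acc memo hm; exact ⟨memo, by simp [pvRowTo], hm⟩
  | succ c ih =>
    intro acc memo hm
    obtain ⟨m', hf, hm'⟩ := ih acc memo hm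
    rw [List.range_succ, List.foldl_append, hf, List.foldl_cons, List.foldl_nil]
    obtain ⟨hv, hOK⟩ := pvSolve_ok s l (s.length + 1) hl c m' hm'
    refine ⟨_, ?_, hOK⟩
    show ((acc ++ (pvRowTo s l c).map pvFlat) ++
        [(s, (c : Int), (c : Int) + (l : Int),
          (pvSolve s (s.length + 1) (c : Int) ((c : Int) + (l : Int)) m').2)],
        (pvSolve s (s.length + 1) (c : Int) ((c : Int) + (l : Int)) m').1)
      = (acc ++ (pvRowTo s l (c+1)).map pvFlat,
        (pvSolve s (s.length + 1) (c : Int) ((c : Int) + (l : Int)) m').1)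
    rw [hv, pvRowTo_succ, List.map_append, List.map_singleton, List.append_assoc]
    rfl

lemma pvB_outer (s : String) :
    ∀ m : Nat, m ≤ s.length →
      ∀ (acc : List (String × Int × Int × Int)) (memo : PySem.Dict (Int × Int) Int),
      pvMemoOK s memo →
      ∃ memo', (List.range m).foldl (fun st (lN : Nat) =>
            (PySem.List.pyRange 0 ((s.length : Int) - (lN : Int)) 1).foldl
              (pvStepAlt s (lN : Int)) st) (acc, memo)
          = (acc ++ (pvTable s m).map pvFlat, memo') ∧ pvMemoOK s memo' := by
  intro m
  induction m with
  | zero => intro _ acc memo hm; exact ⟨memo, by simp [pvTable], hm⟩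
  | succ m ih =>
    intro hm1 acc memo hmOK
    obtain ⟨m', hf, hm'⟩ := ih (by omega) acc memo hmOK
    rw [List.range_succ, List.foldl_append, hf, List.foldl_cons, List.foldl_nil]
    have hrange : PySem.List.pyRange 0 ((s.length : Int) - (m : Int)) 1
        = (List.range (s.length - m)).map (fun (a : Nat) => (a : Int)) := by
      rw [PySem.List.pyRange_one]
      have h1 : (((s.length : Int) - (m : Int)) - 0).toNat = s.length - m := by omega
      rw [h1]
      exact List.map_congr_left (fun a _ => by omega)
    rw [hrange, List.foldl_map]
    obtain ⟨m'', hf2, hm''⟩ := pvB_row s m (by omega) (s.length - m)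
      (acc ++ (pvTable s m).map pvFlat) m' hm'
    refine ⟨m'', ?_, hm''⟩
    rw [hf2, pvTable_succ, List.map_append, List.append_assoc]

lemma pvB_result (s : String) :
    distancesToEmptyString_alt s = (pvTable s s.length).map pvFlat := by
  show ((PySem.List.pyRange 0 (PySem.Str.len s) 1).foldl (fun st l =>
      (PySem.List.pyRange 0 (PySem.Str.len s - l) 1).foldl (pvStepAlt s l) st)
      (([] : List (String × Int × Int × Int)), PySem.Dict.empty)).1
    = (pvTable s s.length).map pvFlat
  have hlen : PySem.Str.len s = (s.length : Int) := by simp [PySem.Str.len]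
  rw [hlen, PySem.List.pyRange_zero_natCast, List.foldl_map]
  obtain ⟨memo', hf, _⟩ := pvB_outer s s.length (le_refl _) [] PySem.Dict.empty (pvMemoOK_empty s)
  rw [hf, List.nil_append]

-- ===== VERDICT (by name: the statement is the Claim_ definition above) =====
theorem distancesToEmptyString_spec : Claim_equal_distancesToEmptyString := by
  unfold Claim_equal_distancesToEmptyString
  intro s _
  unfold Spec_distancesToEmptyString
  rw [pvA_result, pvB_result]
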